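-- pv_equiv track=rewrite | github.com/prography-6th-study/algorithm-code | jisoo/2-후보키.py | get_combination_index_relation
-- ===== SOURCE A (Python) =====
-- def get_combination_index_relation(relation, combination):
--     temp = []
--     count = 0
--     for r in relation:
--         r_temp = []
--         for c in combination:
--             r_temp.append(r[c])
--         temp.append(r_temp)
--         count += 1
--     if count == len(set(map(tuple, temp))):
--         return True
--     return False
-- ===== SOURCE B (Python) =====
-- def get_combination_index_relation(relation, combination):
--     seen = set()
--     for r in relation:
--         key = tuple(r[c] for c in combination)
--         if key in seen:
--             return False
--         seen.add(key)
--     return True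
-- ===== Notes on version B (the rewrite author's own statement) =====
-- stated objective: alternative
-- what changed: Replaces A's two-phase build-all-projections-then-compare-count-with-set-size by a single streaming pass that keeps a set of projection tuples seen so far and returns False immediately on the first duplicate.
import Mathlib
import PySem

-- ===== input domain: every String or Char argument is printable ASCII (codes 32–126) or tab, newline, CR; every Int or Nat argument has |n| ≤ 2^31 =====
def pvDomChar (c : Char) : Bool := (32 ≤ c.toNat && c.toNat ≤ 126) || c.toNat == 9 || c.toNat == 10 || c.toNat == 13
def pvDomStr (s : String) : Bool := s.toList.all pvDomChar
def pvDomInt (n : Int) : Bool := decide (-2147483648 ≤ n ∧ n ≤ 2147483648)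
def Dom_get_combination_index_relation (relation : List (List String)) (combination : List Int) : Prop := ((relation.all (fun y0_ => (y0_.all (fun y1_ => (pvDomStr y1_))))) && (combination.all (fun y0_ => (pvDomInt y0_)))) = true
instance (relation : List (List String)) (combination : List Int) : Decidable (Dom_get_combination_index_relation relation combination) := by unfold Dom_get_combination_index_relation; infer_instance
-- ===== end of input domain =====

-- B replaces A's "collect all projections, then compare count with the size of their set"
-- by a single streaming pass over the rows that keeps a set of projections seen so far and
-- returns False at the first duplicate (alternative decomposition; same asymptotic cost).


-- ===== PORT A =====
-- r[c] is PySem.List.pyGetD (total form of xs[i]); Pre_ below restricts to indices in range,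
-- exactly where Python's r[c] does not raise IndexError.
def get_combination_index_relation (relation : List (List String)) (combination : List Int) : Bool :=
  let st := relation.foldl
    (fun (st : List (List String) × Int) r =>
      let r_temp := combination.foldl (fun acc c => acc ++ [PySem.List.pyGetD r c ""]) []
      (st.1 ++ [r_temp], st.2 + 1))
    ([], 0)
  if st.2 = PySem.Set.len (PySem.Set.ofList st.1) then true else false

-- ===== PORT B =====
-- the projection tuple of one row: tuple(r[c] for c in combination)
def pvProj (combination : List Int) (r : List String) : List String :=
  combination.map (fun c => PySem.List.pyGetD r c "")

-- streaming pass: stop with false at the first projection already seen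
def pvAltGo (combination : List Int) : List (List String) → PySem.Set (List String) → Bool
  | [], _ => true
  | r :: rest, seen =>
      let key := pvProj combination r
      if PySem.Set.contains seen key then false
      else pvAltGo combination rest (PySem.Set.add seen key)

def get_combination_index_relation_alt (relation : List (List String)) (combination : List Int) : Bool :=
  pvAltGo combination relation PySem.Set.empty

-- ===== PRECONDITION & SPEC =====
-- Pre_: every index of combination is a valid Python index into every row; elsewhere A raises IndexError.
def Pre_get_combination_index_relation (relation : List (List String)) (combination : List Int) : Prop :=
  ∀ r ∈ relation, ∀ c ∈ combination, PySem.Raise.InRange r.length c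
instance (relation : List (List String)) (combination : List Int) : Decidable (Pre_get_combination_index_relation relation combination) := by unfold Pre_get_combination_index_relation; infer_instance
def pvWitness_get_combination_index_relation : List (List String) × List Int :=
  ([["a", "b"], ["a", "c"]], [0, 1])

def Spec_get_combination_index_relation (relation : List (List String)) (combination : List Int) (out : Bool) : Prop := out = get_combination_index_relation_alt relation combination
instance (relation : List (List String)) (combination : List Int) (out : Bool) : Decidable (Spec_get_combination_index_relation relation combination out) := by unfold Spec_get_combination_index_relation; infer_instance

-- ===== CLAIM (what is proved, stated in full; the proofs are below) =====
def Claim_equal_get_combination_index_relation : Prop := ∀ (relation : List (List String)) (combination : List Int), Dom_get_combination_index_relation relation combination → Pre_get_combination_index_relation relation combination → Spec_get_combination_index_relation relation combination (get_combination_index_relation relation combination)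

-- ===== LEMMAS AND PROOFS =====

lemma pvSet_length_add_le {α : Type} [BEq α] [LawfulBEq α] (s : PySem.Set α) (x : α) :
    (PySem.Set.add s x).length ≤ s.length + 1 := by
  rw [PySem.Set.add_eq_ite]
  split <;> simp

lemma pvSet_length_update_le {α : Type} [BEq α] [LawfulBEq α] (xs : List α) (s : PySem.Set α) :
    (PySem.Set.update s xs).length ≤ s.length + xs.length := by
  induction xs generalizing s with
  | nil => simp [PySem.Set.update_nil]
  | cons x xs ih =>
      rw [PySem.Set.update_cons]
      calc (PySem.Set.update (PySem.Set.add s x) xs).length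
          ≤ (PySem.Set.add s x).length + xs.length := ih _
        _ ≤ s.length + 1 + xs.length := by
              have := pvSet_length_add_le s x; omega
        _ = s.length + (x :: xs).length := by simp; omega

-- B's loop from state `seen` decides whether inserting all projections grows the set by the row count
lemma pvAltGo_eq (combination : List Int) (l : List (List String)) (s : PySem.Set (List String)) :
    pvAltGo combination l s =
      decide (s.length + l.length = (PySem.Set.update s (l.map (pvProj combination))).length) := by
  induction l generalizing s with
  | nil => simp [pvAltGo, PySem.Set.update_nil]
  | cons r rest ih =>
      simp only [pvAltGo, List.map_cons, PySem.Set.update_cons]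
      by_cases h : pvProj combination r ∈ s
      · have hc : PySem.Set.contains s (pvProj combination r) = true :=
          (PySem.Set.contains_iff _ _).mpr h
        rw [hc]
        simp only [if_true]
        symm
        simp only [decide_eq_false_iff_not]
        intro heq
        rw [PySem.Set.add_of_mem h] at heq
        have hle := pvSet_length_update_le (rest.map (pvProj combination)) s
        simp only [List.length_map, List.length_cons] at heq hle
        omega
      · have hc : PySem.Set.contains s (pvProj combination r) = false :=
          Bool.eq_false_iff.mpr (fun hcc => h ((PySem.Set.contains_iff _ _).mp hcc))
        rw [hc]
        simp only [Bool.false_eq_true, if_false]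
        rw [ih]
        have hl : (PySem.Set.add s (pvProj combination r)).length = s.length + 1 := by
          rw [PySem.Set.add_of_not_mem h]
          simp
        rw [hl]
        congr 1
        simp only [List.length_cons]
        rw [Nat.add_assoc, Nat.add_comm 1]

-- A's loop is the map of projections paired with the row count
lemma pvA_foldl (relation : List (List String)) (combination : List Int)
    (acc : List (List String)) (n : Int) :
    relation.foldl
      (fun (st : List (List String) × Int) r =>
        (st.1 ++ [combination.foldl (fun acc c => acc ++ [PySem.List.pyGetD r c ""]) []], st.2 + 1))
      (acc, n)
    = (acc ++ relation.map (pvProj combination), n + relation.length) := by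
  induction relation generalizing acc n with
  | nil => simp
  | cons r rest ih =>
      simp only [List.foldl_cons]
      rw [ih]
      simp only [PySem.List.foldl_append_singleton_eq_map, List.nil_append, pvProj,
        List.map_cons, Prod.mk.injEq, List.length_cons]
      constructor
      · simp [List.append_assoc]
      · push_cast; omega

-- ===== VERDICT (by name: the statement is the Claim_ definition above) =====
theorem get_combination_index_relation_spec : Claim_equal_get_combination_index_relation := by
  intro relation combination _ _
  unfold Spec_get_combination_index_relation
  unfold get_combination_index_relation get_combination_index_relation_alt
  rw [pvAltGo_eq]
  simp only [pvA_foldl relation combination [] 0, List.nil_append, zero_add]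
  rw [PySem.Set.update_empty]
  simp only [PySem.Set.len, PySem.Set.empty, List.length_nil, Nat.zero_add]
  split
  · next h =>
      symm
      rw [decide_eq_true_iff]
      exact_mod_cast h
  · next h =>
      symm
      rw [decide_eq_false_iff_not]
      intro hn
      exact h (by exact_mod_cast hn)
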